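-- pv_equiv track=rewrite | github.com/rodrygo03/CSCE-489-Project | main/bidir_bounded_gram.py | get_mlm_context
-- ===== SOURCE A (Python) =====
-- def get_mlm_context(unmasked_ids, masked_ids, pos, mask_token_id):
--     """
--     Return left and right context up until another mask is encountered
--     """
--     L = len(unmasked_ids)
--     assert len(masked_ids) == L, "unmasked and masked sequences must be same length"
--
--     if pos < 0 or pos >= L:
--         raise IndexError(f"pos={pos} out of range for sequence of length {L}")
--
--     # walk left until you hit another mask
--     left_tokens = []
--     j = pos - 1
--     while j >= 0:
--         if masked_ids[j] == mask_token_id: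
--             break  # stop at first mask on the left
--         left_tokens.append(unmasked_ids[j])
--         j -= 1
--     left_context = list(reversed(left_tokens))  # restore original order
--
--     # walk right until you hit another mask
--     right_context = []
--     j = pos + 1
--     while j < L:
--         if masked_ids[j] == mask_token_id:
--             break  # stop at first mask on the right
--         right_context.append(unmasked_ids[j])
--         j += 1
--
--     return left_context, right_context
-- ===== SOURCE B (Python) =====
-- def get_mlm_context(unmasked_ids, masked_ids, pos, mask_token_id):
--     """
--     Return left and right context up until another mask is encountered
--     """
--     L = len(unmasked_ids)
--     assert len(masked_ids) == L, "unmasked and masked sequences must be same length"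
--
--     if pos < 0 or pos >= L:
--         raise IndexError(f"pos={pos} out of range for sequence of length {L}")
--
--     # one forward pass over the mask sequence to find the nearest mask
--     # strictly left of pos (lb) and strictly right of pos (rb); a mask at
--     # pos itself is ignored, as the task requires "another" mask.
--     lb = -1
--     rb = L
--     for i, t in enumerate(masked_ids):
--         if t == mask_token_id:
--             if i < pos:
--                 lb = i
--             elif i > pos:
--                 rb = i
--                 break
--
--     return unmasked_ids[lb + 1:pos], unmasked_ids[pos + 1:rb]
-- ===== Notes on version B (the rewrite author's own statement) =====
-- stated objective: alternative
-- what changed: Replaces A's two outward element-by-element walks (left walk with an append-then-reverse accumulator, right walk with appends) by a single forward pass over masked_ids that finds the nearest mask boundaries on each side of pos, returning the two contexts as slices of unmasked_ids.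
import Mathlib
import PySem

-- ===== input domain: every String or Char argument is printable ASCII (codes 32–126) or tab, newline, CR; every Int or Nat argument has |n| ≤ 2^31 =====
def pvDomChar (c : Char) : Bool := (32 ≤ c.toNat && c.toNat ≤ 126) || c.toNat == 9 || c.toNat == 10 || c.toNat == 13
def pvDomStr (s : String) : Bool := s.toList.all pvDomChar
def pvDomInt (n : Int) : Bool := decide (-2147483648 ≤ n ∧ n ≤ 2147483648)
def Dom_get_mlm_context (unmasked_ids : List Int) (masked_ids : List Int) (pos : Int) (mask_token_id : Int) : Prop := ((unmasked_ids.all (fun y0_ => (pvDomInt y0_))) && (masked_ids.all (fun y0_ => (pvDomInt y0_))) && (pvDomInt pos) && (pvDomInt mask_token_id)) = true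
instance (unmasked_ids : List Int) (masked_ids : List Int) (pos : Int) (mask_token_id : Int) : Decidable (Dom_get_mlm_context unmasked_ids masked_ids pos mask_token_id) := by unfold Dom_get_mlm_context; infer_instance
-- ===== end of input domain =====

-- B replaces A's two outward element-by-element walks (plus a reversal) by one
-- forward boundary-finding pass and two slices; objective: alternative decomposition.

-- ===== PORT A =====
-- A's left while-loop: 'j = pos-1; while j >= 0: if masked[j]==mask: break; append; j -= 1'.
-- Ported as fuel recursion on the Int index; the fuel given at the call site is the loop's
-- maximal iteration count, so it never runs out before the guard 'j >= 0' fails.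
def pvLeftLoop (unmasked_ids masked_ids : List Int) (mask_token_id : Int) : Nat → Int → List Int → List Int
  | 0, _, acc => acc
  | f+1, j, acc =>
    if 0 ≤ j then
      if PySem.List.pyGetD masked_ids j 0 == mask_token_id then acc
      else pvLeftLoop unmasked_ids masked_ids mask_token_id f (j - 1) (acc ++ [PySem.List.pyGetD unmasked_ids j 0])
    else acc

-- A's right while-loop: 'j = pos+1; while j < L: if masked[j]==mask: break; append; j += 1'.
def pvRightLoop (unmasked_ids masked_ids : List Int) (mask_token_id L : Int) : Nat → Int → List Int → List Int
  | 0, _, acc => acc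
  | f+1, j, acc =>
    if j < L then
      if PySem.List.pyGetD masked_ids j 0 == mask_token_id then acc
      else pvRightLoop unmasked_ids masked_ids mask_token_id L f (j + 1) (acc ++ [PySem.List.pyGetD unmasked_ids j 0])
    else acc

-- indices stay in range inside both loops, so pyGetD is exact (= Python's masked_ids[j]).
def get_mlm_context (unmasked_ids : List Int) (masked_ids : List Int) (pos : Int) (mask_token_id : Int) : List Int × List Int :=
  let L : Int := unmasked_ids.length
  -- the assert and the IndexError raise are exactly the inputs excluded by Pre_
  let left_tokens := pvLeftLoop unmasked_ids masked_ids mask_token_id pos.toNat (pos - 1) []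
  let left_context := left_tokens.reverse
  let right_context := pvRightLoop unmasked_ids masked_ids mask_token_id L (L - (pos + 1)).toNat (pos + 1) []
  (left_context, right_context)

-- ===== PORT B =====
-- B's single 'for i, t in enumerate(masked_ids)' pass with break: structural recursion on the list.
def pvFindBounds (pos mask_token_id L : Int) : List Int → Int → Int → Int × Int
  | [], _, lb => (lb, L)
  | t :: rest, i, lb =>
    if t == mask_token_id then
      if i < pos then pvFindBounds pos mask_token_id L rest (i + 1) i
      else if pos < i then (lb, i)
      else pvFindBounds pos mask_token_id L rest (i + 1) lb
    else pvFindBounds pos mask_token_id L rest (i + 1) lb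

def get_mlm_context_alt (unmasked_ids : List Int) (masked_ids : List Int) (pos : Int) (mask_token_id : Int) : List Int × List Int :=
  let L : Int := unmasked_ids.length
  let b := pvFindBounds pos mask_token_id L masked_ids 0 (-1)
  (PySem.List.slice unmasked_ids (some (b.1 + 1)) (some pos),
   PySem.List.slice unmasked_ids (some (pos + 1)) (some b.2))

-- ===== PRECONDITION & SPEC =====
-- Pre_ excludes exactly the inputs where A raises: the length assert and the explicit
-- IndexError for pos out of range (B raises identically there).
def Pre_get_mlm_context (unmasked_ids : List Int) (masked_ids : List Int) (pos : Int) (mask_token_id : Int) : Prop :=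
  masked_ids.length = unmasked_ids.length ∧ 0 ≤ pos ∧ pos < (unmasked_ids.length : Int)
instance (unmasked_ids : List Int) (masked_ids : List Int) (pos : Int) (mask_token_id : Int) : Decidable (Pre_get_mlm_context unmasked_ids masked_ids pos mask_token_id) := by unfold Pre_get_mlm_context; infer_instance

def pvWitness_get_mlm_context : List Int × List Int × Int × Int := ([5, 6, 7, 8], [5, 9, 7, 9], 2, 9)

def Spec_get_mlm_context (unmasked_ids : List Int) (masked_ids : List Int) (pos : Int) (mask_token_id : Int) (out : List Int × List Int) : Prop := out = get_mlm_context_alt unmasked_ids masked_ids pos mask_token_id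
instance (unmasked_ids : List Int) (masked_ids : List Int) (pos : Int) (mask_token_id : Int) (out : List Int × List Int) : Decidable (Spec_get_mlm_context unmasked_ids masked_ids pos mask_token_id out) := by unfold Spec_get_mlm_context; infer_instance

-- ===== CLAIM (what is proved, stated in full; the proofs are below) =====
def Claim_equal_get_mlm_context : Prop := ∀ (unmasked_ids : List Int) (masked_ids : List Int) (pos : Int) (mask_token_id : Int), Dom_get_mlm_context unmasked_ids masked_ids pos mask_token_id → Pre_get_mlm_context unmasked_ids masked_ids pos mask_token_id → Spec_get_mlm_context unmasked_ids masked_ids pos mask_token_id (get_mlm_context unmasked_ids masked_ids pos mask_token_id)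

-- ===== LEMMAS AND PROOFS =====

-- A's right walk from index k collects um[k:] up to the first mask in md[k:].
lemma pvRightLoop_eq (um md : List Int) (mask : Int) (hlen : um.length = md.length) :
    ∀ (f k : Nat) (acc : List Int), f + k = md.length →
      pvRightLoop um md mask (um.length : Int) f (k : Int) acc
        = acc ++ (um.drop k).take ((md.drop k).findIdx (· == mask)) := by
  intro f
  induction f with
  | zero =>
      intro k acc hk
      have hk' : k = md.length := by omega
      simp [pvRightLoop, hk', List.drop_of_length_le, hlen]
  | succ f ih =>
      intro k acc hk
      have hklt : k < md.length := by omega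
      have hkum : k < um.length := by omega
      have hguard : ((k : Int) < (um.length : Int)) := by exact_mod_cast hkum
      have hmd : md.drop k = md[k] :: md.drop (k + 1) := List.drop_eq_getElem_cons hklt
      have hum : um.drop k = um[k] :: um.drop (k + 1) := List.drop_eq_getElem_cons hkum
      have hget : PySem.List.pyGetD md (k : Int) 0 = md[k] := by
        rw [PySem.List.pyGetD_natCast]; exact List.getD_eq_getElem md 0 hklt
      have hgetu : PySem.List.pyGetD um (k : Int) 0 = um[k] := by
        rw [PySem.List.pyGetD_natCast]; exact List.getD_eq_getElem um 0 hkum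
      rw [pvRightLoop, if_pos hguard, hget, hgetu]
      cases hmask : (md[k] == mask) with
      | true =>
          rw [if_pos rfl, hmd, List.findIdx_cons]
          simp [hmask]
      | false =>
          rw [if_neg (by simp)]
          have hcast : ((k : Int) + 1) = ((k + 1 : Nat) : Int) := by push_cast; ring
          rw [hcast, ih (k + 1) (acc ++ [um[k]]) (by omega)]
          rw [hmd, hum, List.findIdx_cons]
          simp only [hmask, cond_false, List.take_succ_cons, List.append_assoc, List.singleton_append]

-- A's left walk down from index f-1 collects reversed um[..f] up to the first mask
-- (scanning md[..f] from the right).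
lemma pvLeftLoop_eq (um md : List Int) (mask : Int) (hlen : um.length = md.length) :
    ∀ (f : Nat) (acc : List Int), f ≤ md.length →
      pvLeftLoop um md mask f ((f : Int) - 1) acc
        = acc ++ ((um.take f).reverse).take (((md.take f).reverse).findIdx (· == mask)) := by
  intro f
  induction f with
  | zero => intro acc _; simp [pvLeftLoop]
  | succ f ih =>
      intro acc hf
      have hflt : f < md.length := by omega
      have hfum : f < um.length := by omega
      have hj : ((f + 1 : Nat) : Int) - 1 = (f : Int) := by push_cast; ring
      have hget : PySem.List.pyGetD md (f : Int) 0 = md[f] := by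
        rw [PySem.List.pyGetD_natCast]; exact List.getD_eq_getElem md 0 hflt
      have hgetu : PySem.List.pyGetD um (f : Int) 0 = um[f] := by
        rw [PySem.List.pyGetD_natCast]; exact List.getD_eq_getElem um 0 hfum
      have hmd : (md.take (f + 1)).reverse = md[f] :: (md.take f).reverse := by
        rw [List.take_succ_eq_append_getElem hflt, List.reverse_append]; simp
      have hum2 : (um.take (f + 1)).reverse = um[f] :: (um.take f).reverse := by
        rw [List.take_succ_eq_append_getElem hfum, List.reverse_append]; simp
      rw [pvLeftLoop, hj, if_pos (by positivity), hget, hgetu]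
      cases hmask : (md[f] == mask) with
      | true =>
          rw [if_pos rfl, hmd, List.findIdx_cons]
          simp [hmask]
      | false =>
          rw [if_neg (by simp)]
          rw [ih (acc ++ [um[f]]) (by omega)]
          rw [hmd, hum2, List.findIdx_cons]
          simp only [hmask, cond_false, List.take_succ_cons, List.append_assoc, List.singleton_append]

-- B's pass after it has passed pos: only the right boundary is still open.
lemma pvFindBounds_after (pos mask L : Int) :
    ∀ (md : List Int) (i lb : Int), pos < i →
      pvFindBounds pos mask L md i lb
        = (lb, if md.findIdx (· == mask) < md.length then i + (md.findIdx (· == mask) : Int) else L) := by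
  intro md
  induction md with
  | nil => intro i lb _; simp [pvFindBounds]
  | cons t rest ih =>
      intro i lb hi
      rw [pvFindBounds]
      cases hmask : (t == mask) with
      | true =>
          rw [if_pos rfl, if_neg (by omega), if_pos hi]
          rw [List.findIdx_cons]
          simp [hmask]
      | false =>
          rw [if_neg (by simp), ih (i + 1) lb (by omega)]
          rw [List.findIdx_cons]
          simp only [hmask, cond_false, List.length_cons]
          refine Prod.ext rfl ?_
          simp only
          split_ifs <;> push_cast <;> omega

-- B's pass starting at i ≤ pos: the boundaries it returns, in closed form.
lemma pvFindBounds_main (pos mask L : Int) :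
    ∀ (md : List Int) (i lb : Int), i ≤ pos → (pos - i).toNat ≤ md.length →
      pvFindBounds pos mask L md i lb
        = ((if ((md.take (pos - i).toNat).reverse).findIdx (· == mask) < (pos - i).toNat
            then pos - 1 - (((md.take (pos - i).toNat).reverse).findIdx (· == mask) : Int) else lb),
           (if (md.drop ((pos - i).toNat + 1)).findIdx (· == mask) < (md.drop ((pos - i).toNat + 1)).length
            then pos + 1 + ((md.drop ((pos - i).toNat + 1)).findIdx (· == mask) : Int) else L)) := by
  intro md
  induction md with
  | nil =>
      intro i lb hi hm
      have hz : (pos - i).toNat = 0 := by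
        simpa using hm
      simp [pvFindBounds, hz]
  | cons t rest ih =>
      intro i lb hi hm
      by_cases hip : i = pos
      · -- at pos: a mask here is skipped; the rest is handled by pvFindBounds_after
        have hz : (pos - i).toNat = 0 := by omega
        have hrec : pvFindBounds pos mask L rest (i + 1) lb
            = (lb, if rest.findIdx (· == mask) < rest.length
                   then (i + 1) + (rest.findIdx (· == mask) : Int) else L) :=
          pvFindBounds_after pos mask L rest (i + 1) lb (by omega)
        rw [pvFindBounds]
        have hgoal : (lb, if rest.findIdx (· == mask) < rest.length
                   then (i + 1) + (rest.findIdx (· == mask) : Int) else L)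
            = ((if ((( t :: rest).take (pos - i).toNat).reverse).findIdx (· == mask) < (pos - i).toNat
            then pos - 1 - ((((t :: rest).take (pos - i).toNat).reverse).findIdx (· == mask) : Int) else lb),
           (if ((t :: rest).drop ((pos - i).toNat + 1)).findIdx (· == mask) < ((t :: rest).drop ((pos - i).toNat + 1)).length
            then pos + 1 + (((t :: rest).drop ((pos - i).toNat + 1)).findIdx (· == mask) : Int) else L)) := by
          rw [hz]
          simp only [List.take_zero, List.reverse_nil, zero_add, List.drop_succ_cons, List.drop_zero]
          rw [hip]
          simp
        cases hmask : (t == mask) with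
        | true => rw [if_pos rfl, if_neg (by omega), if_neg (by omega), hrec, hgoal]
        | false => rw [if_neg (by simp), hrec, hgoal]
      · -- strictly before pos
        have hilt : i < pos := lt_of_le_of_ne hi hip
        have hm' : (pos - (i + 1)).toNat ≤ rest.length := by
          simp only [List.length_cons] at hm; omega
        have hmsucc : (pos - i).toNat = (pos - (i + 1)).toNat + 1 := by omega
        have htake : ((t :: rest).take (pos - i).toNat).reverse
            = (rest.take (pos - (i + 1)).toNat).reverse ++ [t] := by
          rw [hmsucc, List.take_succ_cons, List.reverse_cons]
        have hdrop : (t :: rest).drop ((pos - i).toNat + 1) = rest.drop ((pos - (i + 1)).toNat + 1) := by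
          rw [hmsucc]; rfl
        have hlenpre : ((rest.take (pos - (i + 1)).toNat).reverse).length = (pos - (i + 1)).toNat := by
          simp [List.length_take, Nat.min_eq_left hm']
        have hle : ((rest.take (pos - (i + 1)).toNat).reverse).findIdx (· == mask)
            ≤ (pos - (i + 1)).toNat := by
          have := List.findIdx_le_length (p := (· == mask)) (xs := (rest.take (pos - (i + 1)).toNat).reverse)
          omega
        rw [pvFindBounds, htake, hdrop, List.findIdx_append, hlenpre]
        cases hmask : (t == mask) with
        | true =>
            rw [if_pos rfl, if_pos hilt, ih (i + 1) i (by omega) hm']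
            have hone : ([t].findIdx (· == mask)) = 0 := by
              simp [List.findIdx_cons, hmask]
            rw [hone]
            refine Prod.ext ?_ rfl
            simp only
            split_ifs <;> push_cast <;> omega
        | false =>
            rw [if_neg (by simp), ih (i + 1) lb (by omega) hm']
            have hone : ([t].findIdx (· == mask)) = 1 := by
              simp [List.findIdx_cons, hmask]
            rw [hone]
            refine Prod.ext ?_ rfl
            simp only
            split_ifs <;> push_cast <;> omega

-- ===== VERDICT (by name: the statement is the Claim_ definition above) =====
theorem get_mlm_context_spec : Claim_equal_get_mlm_context := by
  intro um md pos mask _ hpre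
  obtain ⟨hlen, h0, hlt⟩ := hpre
  unfold Spec_get_mlm_context get_mlm_context get_mlm_context_alt
  set n : Nat := pos.toNat with hn
  have hpos : pos = (n : Int) := by omega
  have hnlt : n < um.length := by omega
  have hnmd : n ≤ md.length := by omega
  have hfuelR : ((um.length : Int) - (pos + 1)).toNat = um.length - (n + 1) := by omega
  have hA_left : pvLeftLoop um md mask n (pos - 1) []
      = ((um.take n).reverse).take (((md.take n).reverse).findIdx (· == mask)) := by
    have h := pvLeftLoop_eq um md mask (by omega) n [] hnmd
    rw [hpos]; simpa using h
  have hA_right : pvRightLoop um md mask (um.length : Int) (um.length - (n + 1)) (pos + 1) []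
      = (um.drop (n + 1)).take ((md.drop (n + 1)).findIdx (· == mask)) := by
    have h1 : pos + 1 = ((n + 1 : Nat) : Int) := by push_cast; omega
    have h := pvRightLoop_eq um md mask (by omega) (um.length - (n + 1)) (n + 1) [] (by omega)
    rw [h1]; simpa using h
  have hB := pvFindBounds_main pos mask (um.length : Int) md 0 (-1) (by omega) (by omega)
  have hz : (pos - 0).toNat = n := by omega
  rw [hz] at hB
  simp only [hfuelR, hA_left, hA_right, hB]
  set idxL : Nat := ((md.take n).reverse).findIdx (· == mask) with hidxL
  set idxR : Nat := (md.drop (n + 1)).findIdx (· == mask) with hidxR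
  have hlenpre : ((md.take n).reverse).length = n := by
    simp [List.length_take, Nat.min_eq_left hnmd]
  have hidxLle : idxL ≤ n := by
    have := List.findIdx_le_length (p := (· == mask)) (xs := (md.take n).reverse)
    omega
  have htakelen : (um.take n).length = n := by
    simp [List.length_take, Nat.le_of_lt hnlt]
  have hrev : ((um.take n).reverse).take idxL = ((um.take n).drop (n - idxL)).reverse := by
    rw [List.take_reverse, htakelen]
  -- left components agree
  have hleft : (((um.take n).reverse).take idxL).reverse
      = PySem.List.slice um (some ((if idxL < n then pos - 1 - (idxL : Int) else (-1)) + 1)) (some pos) := by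
    by_cases hf : idxL < n
    · rw [if_pos hf]
      have hb : pos - 1 - (idxL : Int) + 1 = ((n - idxL : Nat) : Int) := by
        omega
      rw [hb, hpos, PySem.List.slice_natCast, hrev, List.reverse_reverse, List.drop_take]
    · rw [if_neg hf]
      have hidxLn : idxL = n := by omega
      have hb : (-1 : Int) + 1 = ((0 : Nat) : Int) := by norm_num
      rw [hb, hpos, PySem.List.slice_natCast, hrev, List.reverse_reverse, hidxLn]
      simp
  -- right components agree
  have hdroplen : (md.drop (n + 1)).length = md.length - (n + 1) := by simp
  have hright : (um.drop (n + 1)).take idxR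
      = PySem.List.slice um (some (pos + 1))
          (some (if idxR < (md.drop (n + 1)).length then pos + 1 + (idxR : Int) else (um.length : Int))) := by
    have ha : pos + 1 = ((n + 1 : Nat) : Int) := by push_cast; omega
    by_cases hf : idxR < (md.drop (n + 1)).length
    · rw [if_pos hf, ha]
      have hb : ((n + 1 : Nat) : Int) + (idxR : Int) = ((n + 1 + idxR : Nat) : Int) := by push_cast; ring
      rw [hb, PySem.List.slice_natCast]
      congr 1
      omega
    · rw [if_neg hf, ha]
      have hidxRn : idxR = md.length - (n + 1) := by
        have := List.findIdx_le_length (p := (· == mask)) (xs := md.drop (n + 1))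
        omega
      have hc : (um.length : Int) = ((um.length : Nat) : Int) := rfl
      rw [hc, PySem.List.slice_natCast]
      have h1 : (um.drop (n + 1)).length ≤ idxR := by
        simp only [List.length_drop]; omega
      rw [List.take_of_length_le h1]
      apply (List.take_of_length_le _).symm
      simp only [List.length_drop]
      omega
  exact Prod.ext hleft hright
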